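-- pv_equiv track=rewrite | github.com/pypi-data/pypi-mirror-398 | packages/framebase-commons/framebase_commons-1.0.0-cp310-cp310-manylinux2014_x86_64.manylinux_2_17_x86_64.whl/commons/core/analysis_utils.py | ensure_single_selected_output
-- ===== SOURCE A (Python) =====
-- def ensure_single_selected_output(outputs: list) -> list:
--     """
--     确保至少有一个输出被选中，且只有一个输出被选中
--
--     参数:
--         outputs: 输出列表
--
--     返回:
--         更新后的输出列表
--     """
--     # 如果没有任何输出被选中，选中第一个
--     if not any(output['selected'] for output in outputs):
--         outputs[0]['selected'] = True
--
--     # 如果有多个输出被选中，只保留第一个被选中的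
--     selected_count = sum(1 for output in outputs if output['selected'])
--     if selected_count > 1:
--         flag = 0
--         for output in outputs:
--             if output['selected']:
--                 if not flag:
--                     flag = 1
--                 else:
--                     output['selected'] = False
--
--     return outputs
-- ===== SOURCE B (Python) =====
-- def ensure_single_selected_output(outputs: list) -> list:
--     first = next((i for i, o in enumerate(outputs) if o['selected']), None)
--     if first is None:
--         outputs[0]['selected'] = True
--         return outputs
--     return [dict(o, selected=False) if i > first and o['selected'] else o
--             for i, o in enumerate(outputs)]
-- ===== Notes on version B (the rewrite author's own statement) =====
-- stated objective: simpler
-- what changed: A makes three passes (any-selected check, a count, then a flag-carrying rewrite loop); B finds the index of the first selected output and builds the result in one comprehension that clears only later selected entries. A mutates its argument in place; B returns a fresh list when something is selected (return values are equal).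
import Mathlib
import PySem

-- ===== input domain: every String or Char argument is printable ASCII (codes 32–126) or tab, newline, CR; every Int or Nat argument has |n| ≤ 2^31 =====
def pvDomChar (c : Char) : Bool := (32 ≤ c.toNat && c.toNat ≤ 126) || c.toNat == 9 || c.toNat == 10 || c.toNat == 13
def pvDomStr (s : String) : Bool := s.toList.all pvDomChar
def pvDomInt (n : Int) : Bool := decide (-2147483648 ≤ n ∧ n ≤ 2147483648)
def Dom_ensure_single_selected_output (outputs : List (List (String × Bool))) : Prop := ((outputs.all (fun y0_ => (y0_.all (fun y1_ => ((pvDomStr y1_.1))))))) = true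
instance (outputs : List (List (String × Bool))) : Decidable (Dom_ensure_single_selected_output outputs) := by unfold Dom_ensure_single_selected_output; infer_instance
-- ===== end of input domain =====

-- B replaces A's three scans (any, count, flag-rewrite loop) by "find the first selected index + one comprehension";
-- A mutates its argument in place while B builds a fresh list when something is selected, so the equivalence proved is about the RETURN value.

-- o['selected'] read / write (dict primitives shared by both ports; under Pre_ the key is present, so getD is exact)
def pvGetSel (o : List (String × Bool)) : Bool :=
  PySem.Dict.getD (PySem.Dict.mk o) "selected" false
def pvSetSel (o : List (String × Bool)) (v : Bool) : List (String × Bool) :=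
  (PySem.Dict.insert (PySem.Dict.mk o) "selected" v).items

-- ===== PORT A =====
-- A's second half, over the rebound `outputs`: the selected_count check and the flag loop
def pvSecondPhase (outputs1 : List (List (String × Bool))) : List (List (String × Bool)) :=
  if (1 : Int) < outputs1.foldl (fun n o => if pvGetSel o then n + 1 else n) 0 then
    (outputs1.foldl (fun (st : Int × List (List (String × Bool))) o =>
      if pvGetSel o then
        (if st.1 == 0 then ((1 : Int), st.2 ++ [o]) else (st.1, st.2 ++ [pvSetSel o false]))
      else (st.1, st.2 ++ [o])) ((0 : Int), [])).2
  else outputs1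

def ensure_single_selected_output (outputs : List (List (String × Bool))) : List (List (String × Bool)) :=
  pvSecondPhase
    (if outputs.any pvGetSel then outputs
     else match outputs with
       | [] => []
       | h :: t => pvSetSel h true :: t)

-- ===== PORT B =====
def ensure_single_selected_output_alt (outputs : List (List (String × Bool))) : List (List (String × Bool)) :=
  match (PySem.List.enumerate outputs 0).find? (fun p => pvGetSel p.2) with
  | none =>
      match outputs with
      | [] => []
      | h :: t => pvSetSel h true :: t
  | some q =>
      (PySem.List.enumerate outputs 0).map (fun p =>
        if q.1 < p.1 && pvGetSel p.2 then pvSetSel p.2 false else p.2)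

-- ===== PRECONDITION & SPEC =====
-- Pre_ excludes exactly the inputs where the Python A raises: the empty list (IndexError on outputs[0])
-- and lists containing a dict without the key 'selected' (KeyError).
def Pre_ensure_single_selected_output (outputs : List (List (String × Bool))) : Prop :=
  outputs ≠ [] ∧ ∀ o ∈ outputs, "selected" ∈ o.map Prod.fst
instance (outputs : List (List (String × Bool))) : Decidable (Pre_ensure_single_selected_output outputs) := by
  unfold Pre_ensure_single_selected_output; infer_instance

def pvWitness_ensure_single_selected_output : (List (List (String × Bool))) :=
  ([[("selected", true)], [("selected", false)]])

def Spec_ensure_single_selected_output (outputs : List (List (String × Bool))) (out : List (List (String × Bool))) : Prop := out = ensure_single_selected_output_alt outputs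
instance (outputs : List (List (String × Bool))) (out : List (List (String × Bool))) : Decidable (Spec_ensure_single_selected_output outputs out) := by unfold Spec_ensure_single_selected_output; infer_instance

-- ===== CLAIM (what is proved, stated in full; the proofs are below) =====
def Claim_equal_ensure_single_selected_output : Prop := ∀ (outputs : List (List (String × Bool))), Dom_ensure_single_selected_output outputs → Pre_ensure_single_selected_output outputs → Spec_ensure_single_selected_output outputs (ensure_single_selected_output outputs)

-- ===== LEMMAS AND PROOFS =====

-- the rewrite a selected element suffers in both programs' clearing phase
def pvFals (o : List (String × Bool)) : List (String × Bool) :=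
  if pvGetSel o then pvSetSel o false else o

theorem pv_getSel_setSel (o : List (String × Bool)) (v : Bool) :
    pvGetSel (pvSetSel o v) = v := by
  simp only [pvGetSel, pvSetSel]
  exact PySem.Dict.getD_insert_self (PySem.Dict.mk o) "selected" v false

theorem pv_map_fals_id (v : List (List (String × Bool))) (h : ∀ x ∈ v, pvGetSel x = false) :
    v.map pvFals = v := by
  induction v with
  | nil => rfl
  | cons x t ih =>
    rw [List.map_cons, ih (fun y hy => h y (by simp [hy]))]
    have hx : pvGetSel x = false := h x (by simp)
    simp [pvFals, hx]

theorem pv_decomp (xs : List (List (String × Bool))) (h : xs.any pvGetSel = true) :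
    ∃ u o v, xs = u ++ o :: v ∧ (∀ x ∈ u, pvGetSel x = false) ∧ pvGetSel o = true := by
  induction xs with
  | nil => simp at h
  | cons x t ih =>
    by_cases hx : pvGetSel x = true
    · exact ⟨[], x, t, rfl, by simp, hx⟩
    · have ht : t.any pvGetSel = true := by
        simp only [List.any_cons, Bool.eq_false_iff.mpr hx, Bool.false_or] at h; exact h
      obtain ⟨u, o, v, rfl, hu, ho⟩ := ih ht
      refine ⟨x :: u, o, v, rfl, ?_, ho⟩
      intro y hy
      rcases List.mem_cons.mp hy with rfl | hy'
      · simpa using hx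
      · exact hu y hy'

-- A's flag loop, once the flag is set: every later selected entry is cleared
theorem pv_foldl_flag1 (xs : List (List (String × Bool))) (acc : List (List (String × Bool))) :
    xs.foldl (fun (st : Int × List (List (String × Bool))) o =>
      if pvGetSel o then
        (if st.1 == 0 then ((1 : Int), st.2 ++ [o]) else (st.1, st.2 ++ [pvSetSel o false]))
      else (st.1, st.2 ++ [o])) ((1 : Int), acc) = (1, acc ++ xs.map pvFals) := by
  induction xs generalizing acc with
  | nil => simp
  | cons x t ih =>
    rw [List.foldl_cons]
    by_cases hx : pvGetSel x = true
    · rw [if_pos hx, show (((1 : Int) == 0) = false) from rfl]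
      rw [if_neg (by simp), ih]
      simp [pvFals, hx]
    · rw [if_neg hx, ih]
      simp only [pvFals, hx, Bool.false_eq_true, if_false, List.map_cons]
      simp

-- A's flag loop from flag 0: keeps everything up to and including the first selected entry
theorem pv_foldl_flag0 (u : List (List (String × Bool))) (o : List (String × Bool))
    (v : List (List (String × Bool))) (acc : List (List (String × Bool)))
    (hu : ∀ x ∈ u, pvGetSel x = false) (ho : pvGetSel o = true) :
    (u ++ o :: v).foldl (fun (st : Int × List (List (String × Bool))) o =>
      if pvGetSel o then
        (if st.1 == 0 then ((1 : Int), st.2 ++ [o]) else (st.1, st.2 ++ [pvSetSel o false]))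
      else (st.1, st.2 ++ [o])) ((0 : Int), acc) = (1, acc ++ u ++ o :: v.map pvFals) := by
  induction u generalizing acc with
  | nil =>
    rw [List.nil_append, List.foldl_cons, if_pos ho,
        show (((0 : Int) == 0) = true) from rfl, if_pos rfl, pv_foldl_flag1]
    simp
  | cons x t ih =>
    have hx : pvGetSel x = false := hu x (by simp)
    rw [List.cons_append, List.foldl_cons, if_neg (by simp [hx]),
        ih (acc ++ [x]) (fun y hy => hu y (by simp [hy]))]
    simp

-- B's find? on the enumerated list locates the first selected entry and its index
theorem pv_find_enum (u : List (List (String × Bool))) (o : List (String × Bool))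
    (v : List (List (String × Bool))) (s : Int)
    (hu : ∀ x ∈ u, pvGetSel x = false) (ho : pvGetSel o = true) :
    (PySem.List.enumerate (u ++ o :: v) s).find? (fun p => pvGetSel p.2)
      = some (s + (u.length : Int), o) := by
  induction u generalizing s with
  | nil =>
    simp [PySem.List.enumerate_cons, ho]
  | cons x t ih =>
    have hx : pvGetSel x = false := hu x (by simp)
    rw [List.cons_append, PySem.List.enumerate_cons, List.find?_cons_of_neg (by simp [hx]),
        ih (s + 1) (fun y hy => hu y (by simp [hy]))]
    congr 2
    simp only [List.length_cons]
    push_cast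
    ring

-- B's comprehension past the first selected index clears exactly the selected entries
theorem pv_map_enum_tail (v : List (List (String × Bool))) (s k : Int) (hk : k < s) :
    (PySem.List.enumerate v s).map (fun p =>
        if k < p.1 && pvGetSel p.2 then pvSetSel p.2 false else p.2)
      = v.map pvFals := by
  induction v generalizing s with
  | nil => rfl
  | cons x t ih =>
    rw [PySem.List.enumerate_cons, List.map_cons, List.map_cons, ih (s + 1) (by omega)]
    congr 1
    simp only [pvFals]
    by_cases hx : pvGetSel x = true
    · simp [hx, hk]
    · simp [hx]

-- B's comprehension over the whole list
theorem pv_map_enum (u : List (List (String × Bool))) (o : List (String × Bool))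
    (v : List (List (String × Bool))) (s k : Int)
    (hu : ∀ x ∈ u, pvGetSel x = false) (hk : k = s + (u.length : Int)) :
    (PySem.List.enumerate (u ++ o :: v) s).map (fun p =>
        if k < p.1 && pvGetSel p.2 then pvSetSel p.2 false else p.2)
      = u ++ o :: v.map pvFals := by
  induction u generalizing s with
  | nil =>
    simp only [List.length_nil, Int.natCast_zero, add_zero] at hk
    rw [List.nil_append, PySem.List.enumerate_cons, List.map_cons,
        pv_map_enum_tail v (s + 1) k (by omega)]
    have : ¬ (k < s) := by omega
    simp [this]
  | cons x t ih =>
    have hx : pvGetSel x = false := hu x (by simp)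
    simp only [List.length_cons] at hk
    rw [List.cons_append, PySem.List.enumerate_cons, List.map_cons,
        ih (s + 1) (fun y hy => hu y (by simp [hy])) (by push_cast at hk ⊢; omega)]
    simp [hx]

theorem pv_main (outputs : List (List (String × Bool))) :
    ensure_single_selected_output outputs = ensure_single_selected_output_alt outputs := by
  by_cases hany : outputs.any pvGetSel = true
  · obtain ⟨u, o, v, rfl, hu, ho⟩ := pv_decomp outputs hany
    have hB : ensure_single_selected_output_alt (u ++ o :: v) = u ++ o :: v.map pvFals := by
      unfold ensure_single_selected_output_alt
      rw [pv_find_enum u o v 0 hu ho]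
      exact pv_map_enum u o v 0 _ hu rfl
    have hcu : (u.countP pvGetSel) = 0 := List.countP_eq_zero.mpr (by
      intro x hx; simp [hu x hx])
    have hcount : (u ++ o :: v).foldl (fun n o => if pvGetSel o then n + 1 else n) (0 : Int)
        = 1 + (v.countP pvGetSel : Int) := by
      rw [PySem.List.foldl_count_if]
      simp only [List.countP_append, List.countP_cons, hcu, ho]
      push_cast
      ring
    rw [hB]
    unfold ensure_single_selected_output
    rw [if_pos hany]
    unfold pvSecondPhase
    rw [hcount]
    by_cases hv : v.countP pvGetSel = 0
    · rw [if_neg (by rw [hv]; simp), pv_map_fals_id v (fun x hx => Bool.eq_false_iff.mpr (List.countP_eq_zero.mp hv x hx))]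
    · have h1 : ((1 : Int) < 1 + (v.countP pvGetSel : Int)) := by
        have : 0 < v.countP pvGetSel := Nat.pos_of_ne_zero hv
        omega
      rw [if_pos h1, pv_foldl_flag0 u o v [] hu ho]
      simp
  · have hall : ∀ x ∈ outputs, pvGetSel x = false := by
      intro x hx
      exact Bool.eq_false_iff.mpr (fun hc =>
        hany (List.any_eq_true.mpr ⟨x, hx, by simpa using hc⟩))
    have hfind : (PySem.List.enumerate outputs 0).find? (fun p => pvGetSel p.2) = none := by
      apply List.find?_eq_none.mpr
      intro p hp
      obtain ⟨j, hj, rfl⟩ := (PySem.List.mem_enumerate_iff outputs 0 p).mp hp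
      simp [hall _ (List.getElem_mem hj)]
    unfold ensure_single_selected_output ensure_single_selected_output_alt
    rw [hfind, if_neg hany]
    cases outputs with
    | nil => rfl
    | cons h t =>
      have hct : t.countP pvGetSel = 0 := List.countP_eq_zero.mpr (by
        intro x hx; simp [hall x (by simp [hx])])
      have hcount : (pvSetSel h true :: t).foldl
          (fun n o => if pvGetSel o then n + 1 else n) (0 : Int) = 1 := by
        rw [PySem.List.foldl_count_if]
        simp [pv_getSel_setSel, hct]
      unfold pvSecondPhase
      rw [hcount, if_neg (by norm_num)]

-- ===== VERDICT (by name: the statement is the Claim_ definition above) =====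
theorem ensure_single_selected_output_spec : Claim_equal_ensure_single_selected_output := by
  intro outputs _ _
  unfold Spec_ensure_single_selected_output
  exact pv_main outputs
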